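-- pv_equiv track=rewrite | github.com/biom222/linux-gateway-manager | api/app.py | parse_check_results_text
-- ===== SOURCE A (Python) =====
-- def parse_check_results_text(text: str):
--     items = []
--
--     if not text:
--         return items
--
--     for line in text.splitlines():
--         line = line.strip()
--         if not line:
--             continue
--
--         parts = [part.strip() for part in line.split("|")]
--
--         item = {
--             "TargetName": parts[0] if parts else "unknown",
--             "HttpResult": None,
--             "Tls12Result": None,
--             "Tls13Result": None,
--             "PingResult": None,
--             "FinalStatus": None,
--         }
--
--         for part in parts[1:]:
--             if ":" not in part:
--                 continue
--
--             key, value = part.split(":", 1)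
--             key = key.strip().upper()
--             value = value.strip()
--
--             if key == "HTTP":
--                 item["HttpResult"] = value
--             elif key == "TLS1.2":
--                 item["Tls12Result"] = value
--             elif key == "TLS1.3":
--                 item["Tls13Result"] = value
--             elif key == "PING":
--                 item["PingResult"] = value
--             elif key == "STATUS":
--                 item["FinalStatus"] = value
--
--         if not item["FinalStatus"]:
--             combined = " ".join(
--                 filter(
--                     None,
--                     [
--                         item["HttpResult"],
--                         item["Tls12Result"],
--                         item["Tls13Result"],
--                         item["PingResult"],
--                     ],
--                 )
--             ).upper()
--
--             if "FAIL" in combined or "ERROR" in combined or "TIMEOUT" in combined: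
--                 item["FinalStatus"] = "failed"
--             elif "UNSUP" in combined:
--                 item["FinalStatus"] = "degraded"
--             else:
--                 item["FinalStatus"] = "ok"
--
--         items.append(item)
--
--     return items
-- ===== SOURCE B (Python) =====
-- def _find(rev_parts, key):
--     """Last-wins lookup: first match while scanning the parts back to front."""
--     for part in rev_parts:
--         if ":" in part:
--             k, v = part.split(":", 1)
--             if k.strip().upper() == key:
--                 return v.strip()
--     return None
--
--
-- def parse_check_results_text(text: str):
--     return [
--         _parse_line(stripped)
--         for stripped in (line.strip() for line in text.splitlines())
--         if stripped
--     ]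
--
--
-- def _parse_line(line):
--     parts = [p.strip() for p in line.split("|")]
--     rev = list(reversed(parts[1:]))
--     http = _find(rev, "HTTP")
--     tls12 = _find(rev, "TLS1.2")
--     tls13 = _find(rev, "TLS1.3")
--     ping = _find(rev, "PING")
--     status = _find(rev, "STATUS")
--     if not status:
--         combined = " ".join(filter(None, [http, tls12, tls13, ping])).upper()
--         if "FAIL" in combined or "ERROR" in combined or "TIMEOUT" in combined:
--             status = "failed"
--         elif "UNSUP" in combined:
--             status = "degraded"
--         else:
--             status = "ok"
--     return {
--         "TargetName": parts[0],
--         "HttpResult": http,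
--         "Tls12Result": tls12,
--         "Tls13Result": tls13,
--         "PingResult": ping,
--         "FinalStatus": status,
--     }
-- ===== Notes on version B (the rewrite author's own statement) =====
-- stated objective: alternative
-- what changed: B drops A's single forward pass with a five-slot mutable state machine and instead, per target key, does a separate backward search over the reversed parts (first match while scanning back to front = A's last-wins overwrite), with the line loop as a comprehension instead of an accumulator loop.
import Mathlib
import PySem

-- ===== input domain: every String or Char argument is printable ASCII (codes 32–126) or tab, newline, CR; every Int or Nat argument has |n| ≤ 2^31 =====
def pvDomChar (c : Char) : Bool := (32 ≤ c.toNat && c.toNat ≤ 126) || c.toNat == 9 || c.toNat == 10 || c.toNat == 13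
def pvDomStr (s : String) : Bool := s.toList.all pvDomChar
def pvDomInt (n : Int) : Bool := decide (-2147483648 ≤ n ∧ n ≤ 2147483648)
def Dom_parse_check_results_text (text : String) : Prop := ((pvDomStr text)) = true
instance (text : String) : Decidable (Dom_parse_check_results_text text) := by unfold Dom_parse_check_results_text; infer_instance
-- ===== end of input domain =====

-- B replaces A's forward five-slot state-machine pass over the parts by one backward search per
-- target key over the reversed parts (first match = A's last-wins), and the accumulator loop by a
-- comprehension (objective: alternative).


-- ===== PORT A =====
-- A's item dict has a fixed six-key shape; the five mutable result slots are carried as a 5-tuple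
-- (HttpResult, Tls12Result, Tls13Result, PingResult, FinalStatus) and the item is emitted as its
-- association list in the dict's fixed insertion order.

-- Python truthiness of an Optional[str]: falsy iff None or "".
def pvFalsyA (v : Option String) : Bool :=
  match v with
  | none => true
  | some s => s == ""

-- the body of A's inner 'for part in parts[1:]' loop (if/elif dispatch on the normalized key)
def pvStepA (st : Option String × Option String × Option String × Option String × Option String)
    (part : String) :
    Option String × Option String × Option String × Option String × Option String :=
  if PySem.Str.isIn ":" part = false then st
  else
    match PySem.Str.splitMax? part ":" 1 with
    | some [key, value] =>
      let key := PySem.Str.upper (PySem.Str.strip key)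
      let value := PySem.Str.strip value
      if key = "HTTP" then (some value, st.2.1, st.2.2.1, st.2.2.2.1, st.2.2.2.2)
      else if key = "TLS1.2" then (st.1, some value, st.2.2.1, st.2.2.2.1, st.2.2.2.2)
      else if key = "TLS1.3" then (st.1, st.2.1, some value, st.2.2.2.1, st.2.2.2.2)
      else if key = "PING" then (st.1, st.2.1, st.2.2.1, some value, st.2.2.2.2)
      else if key = "STATUS" then (st.1, st.2.1, st.2.2.1, st.2.2.2.1, some value)
      else st
    | _ => st  -- unreachable: ':' ∈ part, so part.split(":", 1) has exactly two pieces

-- the body of A's outer loop for a non-blank stripped line: build and fill the item dict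
def pvLineA (line : String) : List (String × Option String) :=
  let parts := ((PySem.Str.split? line "|").getD []).map PySem.Str.strip
  let targetName : String := match parts with | [] => "unknown" | p :: _ => p
  let st := (parts.drop 1).foldl pvStepA (none, none, none, none, none)
  let finalStatus : Option String :=
    if pvFalsyA st.2.2.2.2 then
      let combined := PySem.Str.upper (PySem.Str.join " "
        ([st.1, st.2.1, st.2.2.1, st.2.2.2.1].filterMap
          (fun v => if pvFalsyA v then none else v)))
      if PySem.Str.isIn "FAIL" combined || PySem.Str.isIn "ERROR" combined
          || PySem.Str.isIn "TIMEOUT" combined then some "failed"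
      else if PySem.Str.isIn "UNSUP" combined then some "degraded"
      else some "ok"
    else st.2.2.2.2
  [("TargetName", some targetName), ("HttpResult", st.1),
   ("Tls12Result", st.2.1), ("Tls13Result", st.2.2.1),
   ("PingResult", st.2.2.2.1), ("FinalStatus", finalStatus)]

def parse_check_results_text (text : String) : List (List (String × Option String)) :=
  let items : List (List (String × Option String)) := []
  if text = "" then items
  else
    (PySem.Str.splitlines text).foldl (fun items line =>
      let line := PySem.Str.strip line
      if line = "" then items
      else items ++ [pvLineA line]) items

-- ===== PORT B =====
-- Source B's _find: first match while scanning the (already reversed) parts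
def pvFindB (revParts : List String) (key : String) : Option String :=
  match revParts with
  | [] => none
  | part :: rest =>
    if PySem.Str.isIn ":" part then
      match PySem.Str.splitMax? part ":" 1 with
      | some [k, v] =>
        if PySem.Str.upper (PySem.Str.strip k) = key then some (PySem.Str.strip v)
        else pvFindB rest key
      | _ => pvFindB rest key  -- unreachable: ':' ∈ part gives exactly two pieces
    else pvFindB rest key

def pvParseLineB (line : String) : List (String × Option String) :=
  let parts := ((PySem.Str.split? line "|").getD []).map PySem.Str.strip
  let rev := (parts.drop 1).reverse  -- list(reversed(parts[1:]))
  let http := pvFindB rev "HTTP"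
  let tls12 := pvFindB rev "TLS1.2"
  let tls13 := pvFindB rev "TLS1.3"
  let ping := pvFindB rev "PING"
  let status0 := pvFindB rev "STATUS"
  let status : String :=
    if pvFalsyA status0 then
      let combined := PySem.Str.upper (PySem.Str.join " "
        ([http, tls12, tls13, ping].filterMap (fun v => if pvFalsyA v then none else v)))
      if PySem.Str.isIn "FAIL" combined || PySem.Str.isIn "ERROR" combined
          || PySem.Str.isIn "TIMEOUT" combined then "failed"
      else if PySem.Str.isIn "UNSUP" combined then "degraded"
      else "ok"
    else status0.getD ""
  [("TargetName", some (parts.headD "")), ("HttpResult", http), ("Tls12Result", tls12),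
   ("Tls13Result", tls13), ("PingResult", ping), ("FinalStatus", some status)]

def parse_check_results_text_alt (text : String) : List (List (String × Option String)) :=
  (PySem.Str.splitlines text).filterMap (fun line =>
    let stripped := PySem.Str.strip line
    if stripped = "" then none else some (pvParseLineB stripped))

-- ===== PRECONDITION & SPEC =====
def Spec_parse_check_results_text (text : String) (out : List (List (String × Option String))) : Prop := out = parse_check_results_text_alt text
instance (text : String) (out : List (List (String × Option String))) : Decidable (Spec_parse_check_results_text text out) := by unfold Spec_parse_check_results_text; infer_instance

-- ===== CLAIM (what is proved, stated in full; the proofs are below) =====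
def Claim_equal_parse_check_results_text : Prop := ∀ (text : String), Dom_parse_check_results_text text → Spec_parse_check_results_text text (parse_check_results_text text)

-- ===== LEMMAS AND PROOFS =====

-- split never returns the empty list (each branch of splitOn.go emits the reverse of a cons)
theorem pvSplitOnGo_ne_nil (sep : List Char) (fuel : Nat) (l cur : List Char)
    (acc : List (List Char)) : PySem.Chars.splitOn.go sep fuel l cur acc ≠ [] := by
  induction fuel generalizing l cur acc with
  | zero => simp [PySem.Chars.splitOn.go]
  | succ n ih =>
    cases l with
    | nil => simp [PySem.Chars.splitOn.go]
    | cons c rest =>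
      rw [PySem.Chars.splitOn.go]
      split
      · exact ih _ _ _
      · exact ih _ _ _

theorem pvSplit_ne_nil (line : String) : (PySem.Str.split? line "|").getD [] ≠ [] := by
  simp only [PySem.Str.split?, PySem.Chars.split?]
  intro h
  have := pvSplitOnGo_ne_nil ("|".toList) (line.toList.length + 1) line.toList [] []
  simp [PySem.Chars.splitOn] at h ⊢
  exact this (by simpa using h)

-- pvFindB on an appended list: search the prefix first, then the suffix
theorem pvFindB_append (l₁ l₂ : List String) (key : String) :
    pvFindB (l₁ ++ l₂) key = (pvFindB l₁ key).or (pvFindB l₂ key) := by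
  induction l₁ with
  | nil => simp [pvFindB]
  | cons p rest ih =>
    simp only [List.cons_append, pvFindB]
    split_ifs with h
    · cases hsp : PySem.Str.splitMax? p ":" 1 with
      | none => exact ih
      | some ps =>
        match ps with
        | [] => exact ih
        | [k] => exact ih
        | k :: v :: w :: ws => exact ih
        | [k, v] =>
          by_cases hk : PySem.Str.upper (PySem.Str.strip k) = key
          · simp [hk, Option.or]
          · simp only [hk, if_false]; exact ih
    · exact ih

-- one part: A's dispatch step agrees, component-wise, with B's one-element search
theorem pvStep_component (st : Option String × Option String × Option String × Option String × Option String)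
    (a : String) :
    (pvStepA st a).1 = (pvFindB [a] "HTTP").or st.1 ∧
    (pvStepA st a).2.1 = (pvFindB [a] "TLS1.2").or st.2.1 ∧
    (pvStepA st a).2.2.1 = (pvFindB [a] "TLS1.3").or st.2.2.1 ∧
    (pvStepA st a).2.2.2.1 = (pvFindB [a] "PING").or st.2.2.2.1 ∧
    (pvStepA st a).2.2.2.2 = (pvFindB [a] "STATUS").or st.2.2.2.2 := by
  by_cases h : PySem.Str.isIn ":" a = true
  · cases hsp : PySem.Str.splitMax? a ":" 1 with
    | none => simp [pvStepA, pvFindB, hsp, Option.or]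
    | some ps =>
      match ps with
      | [] => simp [pvStepA, pvFindB, hsp, Option.or]
      | [k] => simp [pvStepA, pvFindB, hsp, Option.or]
      | k :: v :: w :: ws => simp [pvStepA, pvFindB, hsp, Option.or]
      | [k, v] =>
        simp only [pvStepA, pvFindB, h, hsp, Bool.true_eq_false, if_false, if_true]
        split_ifs <;> simp_all [Option.or]
  · simp only [Bool.not_eq_true] at h
    simp only [PySem.Str.isIn] at h
    have h' : PySem.Chars.isIn [':'] a.toList = false := h
    simp [pvStepA, pvFindB, PySem.Str.isIn, h', Option.or]

-- core: A's forward fold over the parts equals B's backward searches, slot by slot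
theorem pvCore (parts : List String)
    (st : Option String × Option String × Option String × Option String × Option String) :
    (parts.foldl pvStepA st).1 = (pvFindB parts.reverse "HTTP").or st.1 ∧
    (parts.foldl pvStepA st).2.1 = (pvFindB parts.reverse "TLS1.2").or st.2.1 ∧
    (parts.foldl pvStepA st).2.2.1 = (pvFindB parts.reverse "TLS1.3").or st.2.2.1 ∧
    (parts.foldl pvStepA st).2.2.2.1 = (pvFindB parts.reverse "PING").or st.2.2.2.1 ∧
    (parts.foldl pvStepA st).2.2.2.2 = (pvFindB parts.reverse "STATUS").or st.2.2.2.2 := by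
  induction parts generalizing st with
  | nil => simp [pvFindB, Option.or]
  | cons a rest ih =>
    obtain ⟨i1, i2, i3, i4, i5⟩ := ih (pvStepA st a)
    obtain ⟨s1, s2, s3, s4, s5⟩ := pvStep_component st a
    simp only [List.foldl_cons, List.reverse_cons, pvFindB_append] at *
    refine ⟨?_, ?_, ?_, ?_, ?_⟩ <;>
      simp only [i1, i2, i3, i4, i5, s1, s2, s3, s4, s5, Option.or_assoc]

-- the per-line results of the two ports agree
set_option maxHeartbeats 1000000 in
theorem pvLineEq (line : String) : pvLineA line = pvParseLineB line := by
  unfold pvLineA pvParseLineB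
  cases hp : (PySem.Str.split? line "|").getD [] with
  | nil => exact absurd hp (pvSplit_ne_nil line)
  | cons p ps =>
    obtain ⟨c1, c2, c3, c4, c5⟩ :=
      pvCore (List.map PySem.Str.strip ps) (none, none, none, none, none)
    simp only [List.map_cons, List.headD_cons, List.drop_succ_cons, List.drop_zero,
      c1, c2, c3, c4, c5, Option.or_none]
    cases hs : pvFindB (List.map PySem.Str.strip ps).reverse "STATUS" with
    | none =>
      simp only [pvFalsyA]
      split_ifs <;> rfl
    | some s =>
      by_cases hse : (s == "") = true
      · simp only [pvFalsyA, hse]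
        split_ifs <;> rfl
      · simp only [pvFalsyA, hse, Bool.false_eq_true, if_false, Option.getD]

-- singleton-or-nil flatMap is filterMap
theorem pvFlatMap_filterMap {α β : Type} (l : List α) (p : α → Prop) [DecidablePred p]
    (f : α → β) :
    l.flatMap (fun x => if p x then [] else [f x]) =
      l.filterMap (fun x => if p x then none else some (f x)) := by
  induction l with
  | nil => rfl
  | cons a t ih =>
    simp only [List.flatMap_cons, List.filterMap_cons]
    split_ifs <;> simp [ih]

theorem parse_check_results_text_spec : Claim_equal_parse_check_results_text := by
  intro text _
  unfold Spec_parse_check_results_text parse_check_results_text parse_check_results_text_alt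
  by_cases ht : text = ""
  · subst ht; rfl
  · simp only [ht, if_false]
    have hbody : (fun (items : List (List (String × Option String))) line =>
        if PySem.Str.strip line = "" then items else items ++ [pvLineA (PySem.Str.strip line)]) =
        (fun items line => items ++
          (if PySem.Str.strip line = "" then [] else [pvLineA (PySem.Str.strip line)])) := by
      funext items line
      split_ifs <;> simp
    rw [hbody, PySem.List.foldl_append_eq_flatMap,
      pvFlatMap_filterMap (p := fun line => PySem.Str.strip line = "")
        (f := fun line => pvLineA (PySem.Str.strip line))]
    simp only [List.nil_append, pvLineEq]
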